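-- pv_equiv track=rewrite | github.com/sbcsaitranslator/sbcs-ai-translator | app/services/glossary.py | build_indofix_rows
-- ===== SOURCE A (Python) =====
-- def _pick(target_lang: str, en: str, ja: str, zh: str) -> str:
--     t = (target_lang or "").lower()
--     if t in ("ja", "jp"):
--         return ja
--     if t in ("zh", "zh-cn", "zh-hans", "zh-sg", "zh-my"):
--         return zh  # default ke simplified
--     return en
--
-- def build_indofix_rows(target_lang: str) -> list[tuple[str, str]]:
--     pairs = {
--         "detik-detik": _pick(target_lang, "moments", "瞬間", "时刻"),
--         "saat ini": _pick(target_lang, "currently", "現在", "目前"),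
--         "triwulan": _pick(target_lang, "quarter", "四半期", "季度"),
--         "kuartal": _pick(target_lang, "quarter", "四半期", "季度"),
--         "laporan keuangan": _pick(target_lang, "financial report", "財務報告書", "财务报告"),
--         "neraca": _pick(target_lang, "balance sheet", "貸借対照表", "资产负债表"),
--         "rugi laba": _pick(target_lang, "profit and loss", "損益計算書", "损益表"),
--         "pendapatan": _pick(target_lang, "revenue", "収益", "收入"),
--         "keuntungan": _pick(target_lang, "profit", "利益", "利润"),
--         "investasi": _pick(target_lang, "investment", "投資", "投资"),
--         "perusahaan": _pick(target_lang, "company", "会社", "公司"),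
--         "korporasi": _pick(target_lang, "corporation", "企業", "企业"),
--     }
--     return [(src, dst) for src, dst in pairs.items()]
-- ===== SOURCE B (Python) =====
-- # Table-driven dispatch: each language code maps to a whole precomputed column;
-- # the result is zip(terms, column). No per-row language branching at all.
--
-- _TERMS = ["detik-detik", "saat ini", "triwulan", "kuartal", "laporan keuangan",
--           "neraca", "rugi laba", "pendapatan", "keuntungan", "investasi",
--           "perusahaan", "korporasi"]
--
-- _EN = ["moments", "currently", "quarter", "quarter", "financial report",
--        "balance sheet", "profit and loss", "revenue", "profit", "investment",
--        "company", "corporation"]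
--
-- _JA = ["瞬間", "現在", "四半期", "四半期", "財務報告書",
--        "貸借対照表", "損益計算書", "収益", "利益", "投資",
--        "会社", "企業"]
--
-- _ZH = ["时刻", "目前", "季度", "季度", "财务报告",
--        "资产负债表", "损益表", "收入", "利润", "投资",
--        "公司", "企业"]
--
-- _BY_LANG = {"ja": _JA, "jp": _JA,
--             "zh": _ZH, "zh-cn": _ZH, "zh-hans": _ZH, "zh-sg": _ZH, "zh-my": _ZH}
--
-- def build_indofix_rows(target_lang: str) -> list[tuple[str, str]]:
--     column = _BY_LANG.get((target_lang or "").lower(), _EN)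
--     return list(zip(_TERMS, column))
-- ===== Notes on version B (the rewrite author's own statement) =====
-- stated objective: simpler
-- what changed: Replaced per-entry _pick branching and a dict rebuild with a dispatch table that maps each language code to a whole precomputed column list, then a single zip of the term list with that column.
import Mathlib
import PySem

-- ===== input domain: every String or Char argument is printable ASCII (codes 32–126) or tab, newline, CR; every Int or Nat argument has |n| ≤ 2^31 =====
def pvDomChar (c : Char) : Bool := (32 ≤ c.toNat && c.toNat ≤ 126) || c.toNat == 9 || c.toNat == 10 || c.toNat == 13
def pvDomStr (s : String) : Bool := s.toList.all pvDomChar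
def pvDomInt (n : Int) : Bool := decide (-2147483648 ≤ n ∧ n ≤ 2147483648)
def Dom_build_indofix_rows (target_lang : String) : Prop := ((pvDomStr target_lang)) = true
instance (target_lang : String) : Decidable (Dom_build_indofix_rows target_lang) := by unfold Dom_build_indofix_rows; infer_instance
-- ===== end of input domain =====

-- B replaces per-entry _pick branching and a dict rebuild with a dispatch table mapping each
-- language code to a whole precomputed column list, zipped with the term list (objective: simpler).

-- ===== PORT A =====
-- `(target_lang or "").lower()`: `or ""` returns "" on the empty string and target_lang otherwise (exact).
def pvPick (target_lang en ja zh : String) : String :=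
  let t := PySem.Str.lower (if target_lang == "" then "" else target_lang)
  if t ∈ (["ja", "jp"] : List String) then ja
  else if t ∈ (["zh", "zh-cn", "zh-hans", "zh-sg", "zh-my"] : List String) then zh
  else en

def build_indofix_rows (target_lang : String) : List (String × String) :=
  let pairs : PySem.Dict String String :=
    (((((((((((PySem.Dict.empty.insert "detik-detik" (pvPick target_lang "moments" "瞬間" "时刻")).insert
      "saat ini" (pvPick target_lang "currently" "現在" "目前")).insert
      "triwulan" (pvPick target_lang "quarter" "四半期" "季度")).insert
      "kuartal" (pvPick target_lang "quarter" "四半期" "季度")).insert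
      "laporan keuangan" (pvPick target_lang "financial report" "財務報告書" "财务报告")).insert
      "neraca" (pvPick target_lang "balance sheet" "貸借対照表" "资产负债表")).insert
      "rugi laba" (pvPick target_lang "profit and loss" "損益計算書" "损益表")).insert
      "pendapatan" (pvPick target_lang "revenue" "収益" "收入")).insert
      "keuntungan" (pvPick target_lang "profit" "利益" "利润")).insert
      "investasi" (pvPick target_lang "investment" "投資" "投资")).insert
      "perusahaan" (pvPick target_lang "company" "会社" "公司")).insert
      "korporasi" (pvPick target_lang "corporation" "企業" "企业")
  pairs.items.map (fun p => (p.1, p.2))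

-- ===== PORT B =====
def pvTerms : List String :=
  ["detik-detik", "saat ini", "triwulan", "kuartal", "laporan keuangan",
   "neraca", "rugi laba", "pendapatan", "keuntungan", "investasi",
   "perusahaan", "korporasi"]

def pvEN : List String :=
  ["moments", "currently", "quarter", "quarter", "financial report",
   "balance sheet", "profit and loss", "revenue", "profit", "investment",
   "company", "corporation"]

def pvJA : List String :=
  ["瞬間", "現在", "四半期", "四半期", "財務報告書",
   "貸借対照表", "損益計算書", "収益", "利益", "投資",
   "会社", "企業"]

def pvZH : List String :=
  ["时刻", "目前", "季度", "季度", "财务报告",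
   "资产负债表", "损益表", "收入", "利润", "投资",
   "公司", "企业"]

def pvByLang : PySem.Dict String (List String) :=
  ((((((PySem.Dict.empty.insert "ja" pvJA).insert "jp" pvJA).insert
    "zh" pvZH).insert "zh-cn" pvZH).insert "zh-hans" pvZH).insert
    "zh-sg" pvZH).insert "zh-my" pvZH

def build_indofix_rows_alt (target_lang : String) : List (String × String) :=
  let column := pvByLang.getD (PySem.Str.lower (if target_lang == "" then "" else target_lang)) pvEN
  pvTerms.zip column

-- ===== PRECONDITION & SPEC =====
def Spec_build_indofix_rows (target_lang : String) (out : List (String × String)) : Prop := out = build_indofix_rows_alt target_lang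
instance (target_lang : String) (out : List (String × String)) : Decidable (Spec_build_indofix_rows target_lang out) := by unfold Spec_build_indofix_rows; infer_instance

-- ===== CLAIM (what is proved, stated in full; the proofs are below) =====
def Claim_equal_build_indofix_rows : Prop := ∀ (target_lang : String), Dom_build_indofix_rows target_lang → Spec_build_indofix_rows target_lang (build_indofix_rows target_lang)

-- ===== LEMMAS AND PROOFS =====

-- ===== VERDICT (by name: the statement is the Claim_ definition above) =====
theorem build_indofix_rows_spec : Claim_equal_build_indofix_rows := by
  intro tl _
  unfold Spec_build_indofix_rows build_indofix_rows build_indofix_rows_alt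
  simp only [pvPick]
  by_cases h1 : (PySem.Str.lower (if tl == "" then "" else tl)) ∈ (["ja", "jp"] : List String)
  · simp only [List.mem_cons, List.not_mem_nil, or_false] at h1
    rcases h1 with h | h <;> rw [h] <;> decide
  · by_cases h2 : (PySem.Str.lower (if tl == "" then "" else tl)) ∈
        (["zh", "zh-cn", "zh-hans", "zh-sg", "zh-my"] : List String)
    · simp only [List.mem_cons, List.not_mem_nil, or_false] at h2
      rcases h2 with h | h | h | h | h <;> rw [h] <;> decide
    · -- default branch: the lowered tag matches no dispatch key, so B's getD falls back to pvEN
      simp only [if_neg h1, if_neg h2]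
      simp only [List.mem_cons, List.not_mem_nil, or_false, not_or] at h1 h2
      obtain ⟨hja, hjp⟩ := h1
      obtain ⟨hzh, hcn, hhans, hsg, hmy⟩ := h2
      simp only [beq_iff_eq] at hja hjp hzh hcn hhans hsg hmy
      have hb : pvByLang.getD (PySem.Str.lower (if tl == "" then "" else tl)) pvEN = pvEN := by
        apply PySem.Dict.getD_of_not_contains
        simp [pvByLang, PySem.Dict.contains_insert, PySem.Dict.contains_empty, beq_iff_eq,
              hja, hjp, hzh, hcn, hhans, hsg, hmy]
      rw [hb]
      decide
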